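-- pv_equiv track=rewrite | github.com/xmoiduts/OpenAI-API-transcriber | src/time_slicer/time_slicer.py | pad_intervals_right
-- ===== SOURCE A (Python) =====
-- def pad_intervals_right(intervals, padding):
--     """
--     Extend each interval to the right by a given amount to create overlapping.
--
--     :param intervals: List of tuples representing time intervals (start, duration)
--     :param padding: Amount to extend each interval by (in seconds)
--     :return: List of extended intervals
--     """
--     padded_intervals = []
--     for i, (start, duration) in enumerate(intervals):
--         if i == len(intervals) - 1:
--             # Don't pad the last interval
--             padded_intervals.append((start, duration))
--         else:
--             padded_intervals.append((start, duration + padding))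
--     return padded_intervals
-- ===== SOURCE B (Python) =====
-- def pad_intervals_right(intervals, padding):
--     # Build the output back-to-front: walk the intervals in reverse, carrying
--     # a tail-pad accumulator that is 0 for the first element seen (the last
--     # interval) and padding thereafter, then reverse once at the end.
--     result = []
--     tail_pad = 0
--     for start, duration in reversed(intervals):
--         result.append((start, duration + tail_pad))
--         tail_pad = padding
--     result.reverse()
--     return result
-- ===== Notes on version B (the rewrite author's own statement) =====
-- stated objective: alternative
-- what changed: Builds the output back-to-front by iterating over reversed(intervals) with a carried tail-pad accumulator (0 for the last interval, padding afterwards), eliminating A's per-element i == len-1 index test, then reverses once.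
import Mathlib
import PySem

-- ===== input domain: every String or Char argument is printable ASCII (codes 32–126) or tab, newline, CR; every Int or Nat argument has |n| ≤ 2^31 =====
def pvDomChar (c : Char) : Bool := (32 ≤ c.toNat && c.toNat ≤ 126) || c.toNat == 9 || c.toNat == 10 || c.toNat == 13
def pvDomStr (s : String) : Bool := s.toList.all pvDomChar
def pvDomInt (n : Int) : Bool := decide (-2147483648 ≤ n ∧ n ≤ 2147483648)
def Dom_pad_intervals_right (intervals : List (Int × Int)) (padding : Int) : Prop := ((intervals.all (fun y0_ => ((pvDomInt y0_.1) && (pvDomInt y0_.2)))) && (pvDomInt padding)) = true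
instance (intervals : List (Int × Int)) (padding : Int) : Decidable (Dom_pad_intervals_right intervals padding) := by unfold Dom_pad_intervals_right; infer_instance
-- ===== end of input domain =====

-- B builds the output back-to-front over the reversed list with a tail-pad accumulator, removing A's index test (objective: alternative).
-- ===== PORT A =====
-- literal port of A: indexed loop, branch on i == len-1
def pad_intervals_right (intervals : List (Int × Int)) (padding : Int) : List (Int × Int) :=
  (PySem.List.enumerate intervals).foldl
    (fun padded_intervals p =>
      if p.1 == (intervals.length : Int) - 1 then
        padded_intervals ++ [(p.2.1, p.2.2)]
      else
        padded_intervals ++ [(p.2.1, p.2.2 + padding)])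
    []

-- ===== PORT B =====
-- port of B: fold over reversed(intervals) carrying (result, tail_pad), then reverse the result
def pad_intervals_right_alt (intervals : List (Int × Int)) (padding : Int) : List (Int × Int) :=
  (intervals.reverse.foldl
    (fun (st : List (Int × Int) × Int) p => (st.1 ++ [(p.1, p.2 + st.2)], padding))
    ([], 0)).1.reverse

-- ===== PRECONDITION & SPEC =====
def Spec_pad_intervals_right (intervals : List (Int × Int)) (padding : Int) (out : List (Int × Int)) : Prop := out = pad_intervals_right_alt intervals padding
instance (intervals : List (Int × Int)) (padding : Int) (out : List (Int × Int)) : Decidable (Spec_pad_intervals_right intervals padding out) := by unfold Spec_pad_intervals_right; infer_instance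

-- ===== CLAIM (what is proved, stated in full; the proofs are below) =====
def Claim_equal_pad_intervals_right : Prop := ∀ (intervals : List (Int × Int)) (padding : Int), Dom_pad_intervals_right intervals padding → Spec_pad_intervals_right intervals padding (pad_intervals_right intervals padding)

-- ===== LEMMAS AND PROOFS =====
-- A's fold appends one padded pair per enumerated element
theorem foldl_gen (padding : Int) (n : Int) (xs : List (Int × (Int × Int))) (acc : List (Int × Int)) :
    xs.foldl
      (fun padded_intervals p =>
        if p.1 == n then padded_intervals ++ [(p.2.1, p.2.2)]
        else padded_intervals ++ [(p.2.1, p.2.2 + padding)])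
      acc
    = acc ++ xs.map (fun q =>
        if q.1 == n then (q.2.1, q.2.2) else (q.2.1, q.2.2 + padding)) := by
  induction xs generalizing acc with
  | nil => simp
  | cons x xs ih => rw [List.foldl_cons, ih]; by_cases h : x.1 = n <;> simp [h]

-- only the index n = s + len - 1 (the last element) escapes the padding
theorem map_enum (padding : Int) (xs : List (Int × Int)) (s : Int) :
    (PySem.List.enumerate xs s).map (fun q =>
        if q.1 == s + (xs.length : Int) - 1 then (q.2.1, q.2.2)
        else (q.2.1, q.2.2 + padding))
    = match xs.getLast? with
      | none => []
      | some last => (xs.dropLast.map (fun q => (q.1, q.2 + padding))) ++ [(last.1, last.2)] := by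
  induction xs generalizing s with
  | nil => simp [PySem.List.enumerate_nil]
  | cons x xs ih =>
    cases xs with
    | nil => simp [PySem.List.enumerate_cons, PySem.List.enumerate_nil]
    | cons y ys =>
      have hlen : s + (((x :: y :: ys).length : Nat) : Int) - 1
          = s + 1 + (((y :: ys).length : Nat) : Int) - 1 := by
        simp only [List.length_cons]; push_cast; ring
      rw [hlen]
      rw [PySem.List.enumerate_cons, List.map_cons]
      have hfalse : (s == s + 1 + (((y :: ys).length : Nat) : Int) - 1) = false := by
        simp only [beq_eq_false_iff_ne, ne_eq, List.length_cons]; push_cast; omega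
      rw [hfalse]
      simp only [Bool.false_eq_true, if_false]
      rw [ih (s + 1)]
      simp only [List.getLast?_cons_cons]
      cases h2 : (y :: ys).getLast? with
      | none => simp at h2
      | some last => simp

-- B's fold: first element of l padded by t, the rest by padding, appended to acc
theorem foldB_gen (padding : Int) (l : List (Int × Int)) (acc : List (Int × Int)) (t : Int) :
    (l.foldl
      (fun (st : List (Int × Int) × Int) p => (st.1 ++ [(p.1, p.2 + st.2)], padding))
      (acc, t)).1
    = acc ++ (match l with
        | [] => []
        | x :: rest => (x.1, x.2 + t) :: rest.map (fun q => (q.1, q.2 + padding))) := by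
  induction l generalizing acc t with
  | nil => simp
  | cons x rest ih =>
    rw [List.foldl_cons, ih]
    cases rest with
    | nil => simp
    | cons y ys => simp

theorem ports_agree (intervals : List (Int × Int)) (padding : Int) :
    pad_intervals_right intervals padding = pad_intervals_right_alt intervals padding := by
  unfold pad_intervals_right pad_intervals_right_alt
  rw [foldl_gen, List.nil_append]
  have h := map_enum padding intervals 0
  simp only [zero_add] at h
  rw [h, foldB_gen, List.nil_append]
  cases hr : intervals.reverse with
  | nil =>
    have : intervals = [] := by simpa using congrArg List.reverse hr
    subst this; simp
  | cons x rest =>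
    have : intervals = rest.reverse ++ [x] := by
      have := congrArg List.reverse hr
      simpa using this
    subst this
    simp [List.map_reverse]

-- ===== VERDICT (by name: the statement is the Claim_ definition above) =====
theorem pad_intervals_right_spec : Claim_equal_pad_intervals_right := by
  intro intervals padding _
  unfold Spec_pad_intervals_right
  exact ports_agree intervals padding
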